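-- pv_equiv track=rewrite | github.com/MarkusThill/AdventOfCode | 2023/day14/day14.py | naive_cycle_detector
-- ===== SOURCE A (Python) =====
-- def naive_cycle_detector(sequence):
--     """
--     Fast enough cycle detector for this problem.
--     Detects the start 'mu' of the cycle and the cycle length 'lambda'.
--     """
--     for mu in range(len(sequence)):
--         for lam in range(1, len(sequence) // 2 - mu):
--             for i in range(len(sequence) - mu - lam):
--                 if sequence[mu + i] != sequence[mu + lam + i]:
--                     break
--             else:
--                 return mu, lam
--     return None, None
-- ===== SOURCE B (Python) =====
-- def naive_cycle_detector(sequence):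
--     # One backward scan per candidate cycle length computes the earliest
--     # lam-periodic start; the answer is the lexicographically smallest
--     # feasible (start, length) pair, tracked with a running minimum.
--     n = len(sequence)
--     half = n // 2
--     best_mu = best_lam = None
--     for lam in range(1, half):
--         m = 0
--         for i in range(n - lam - 1, -1, -1):
--             if sequence[i] != sequence[i + lam]:
--                 m = i + 1
--                 break
--         if m + lam < half and (best_mu is None or m < best_mu):
--             best_mu, best_lam = m, lam
--     return best_mu, best_lam
-- ===== Notes on version B (the rewrite author's own statement) =====
-- stated objective: faster
-- what changed: A tries every (mu, lam) pair and rescans the whole suffix for each; B does one backward scan per candidate cycle length lam to find the earliest lam-periodic start, then takes a running minimum over the feasible (start, lam) pairs, turning the O(n^3) triple loop into an O(n^2) double loop.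
import Mathlib
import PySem

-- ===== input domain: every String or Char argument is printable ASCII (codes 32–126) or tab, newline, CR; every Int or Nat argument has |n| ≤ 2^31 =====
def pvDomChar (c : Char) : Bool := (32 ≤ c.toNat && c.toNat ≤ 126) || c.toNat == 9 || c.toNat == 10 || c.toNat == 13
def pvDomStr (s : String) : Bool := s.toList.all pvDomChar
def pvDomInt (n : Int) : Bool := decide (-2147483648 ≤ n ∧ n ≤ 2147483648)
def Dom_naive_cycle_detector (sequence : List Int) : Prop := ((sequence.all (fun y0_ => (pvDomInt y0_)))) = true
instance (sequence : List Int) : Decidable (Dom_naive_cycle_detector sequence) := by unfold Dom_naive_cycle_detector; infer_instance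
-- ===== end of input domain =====

-- B replaces A's triple nested search by one backward scan per candidate cycle
-- length plus a running minimum over the resulting (start, length) pairs
-- (objective: faster).

-- ===== PORT A =====
-- inner 'for i … break / else' of A: all positions lam apart agree from mu on
-- (indices are always in range, so sequence[..] is ported with pyGetD)
def pvACheck (seq : List Int) (mu lam : Int) : Bool :=
  (PySem.List.pyRange 0 (PySem.List.len seq - mu - lam) 1).all
    (fun i => PySem.List.pyGetD seq (mu + i) 0 == PySem.List.pyGetD seq (mu + lam + i) 0)

def naive_cycle_detector (sequence : List Int) : Option Int × Option Int :=
  ((PySem.List.pyRange 0 (PySem.List.len sequence) 1).findSome?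
    (fun mu =>
      ((PySem.List.pyRange 1 (PySem.Int.floordiv (PySem.List.len sequence) 2 - mu) 1).find?
        (fun lam => pvACheck sequence mu lam)).map
        (fun lam => ((some mu, some lam) : Option Int × Option Int)))).getD (none, none)

-- ===== PORT B =====
-- Source B inner loop: 'for i in range(n-lam-1, -1, -1): if seq[i] != seq[i+lam]: m = i+1; break'
def pvBScan (seq : List Int) (lam : Int) : Int :=
  match (PySem.List.pyRange (PySem.List.len seq - lam - 1) (-1) (-1)).find?
      (fun i => PySem.List.pyGetD seq i 0 != PySem.List.pyGetD seq (i + lam) 0) with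
  | some i => i + 1
  | none => 0

-- Source B loop body: 'if m + lam < half and (best_mu is None or m < best_mu): best = (m, lam)'
def pvBStep (seq : List Int) (half : Int) (best : Option Int × Option Int) (lam : Int) :
    Option Int × Option Int :=
  let m := pvBScan seq lam
  if m + lam < half ∧ (best.1 = none ∨ ∃ bm, best.1 = some bm ∧ m < bm) then
    (some m, some lam)
  else best

def naive_cycle_detector_alt (sequence : List Int) : Option Int × Option Int :=
  let half := PySem.Int.floordiv (PySem.List.len sequence) 2
  (PySem.List.pyRange 1 half 1).foldl (pvBStep sequence half) (none, none)

-- ===== PRECONDITION & SPEC =====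
def Spec_naive_cycle_detector (sequence : List Int) (out : Option Int × Option Int) : Prop := out = naive_cycle_detector_alt sequence
instance (sequence : List Int) (out : Option Int × Option Int) : Decidable (Spec_naive_cycle_detector sequence out) := by unfold Spec_naive_cycle_detector; infer_instance

-- ===== CLAIM (what is proved, stated in full; the proofs are below) =====
def Claim_equal_naive_cycle_detector : Prop := ∀ (sequence : List Int), Dom_naive_cycle_detector sequence → Spec_naive_cycle_detector sequence (naive_cycle_detector sequence)

-- ===== LEMMAS AND PROOFS =====

-- 'seq is lam-periodic from position mu on'
def pvPer (seq : List Int) (lam mu : Int) : Prop :=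
  ∀ j : Int, mu ≤ j → j + lam < (seq.length : Int) →
    PySem.List.pyGetD seq j 0 = PySem.List.pyGetD seq (j + lam) 0

-- '(mu, lam) is a pair A's search accepts'
def pvGood (seq : List Int) (lam mu : Int) : Prop :=
  1 ≤ lam ∧ 0 ≤ mu ∧ mu + lam < PySem.Int.floordiv (PySem.List.len seq) 2 ∧ pvPer seq lam mu

-- both ports return either (none, none) with no good pair at all, or the
-- lexicographically least good pair
def pvShape (seq : List Int) (out : Option Int × Option Int) : Prop :=
  (out = (none, none) ∧ ∀ lam mu : Int, ¬ pvGood seq lam mu)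
  ∨ (∃ mu lam : Int, out = (some mu, some lam) ∧ pvGood seq lam mu ∧
      ∀ lam' mu' : Int, pvGood seq lam' mu' → (mu < mu' ∨ (mu = mu' ∧ lam ≤ lam')))

lemma pvHalf_le (seq : List Int) :
    PySem.Int.floordiv (PySem.List.len seq) 2 ≤ (seq.length : Int) := by
  rw [PySem.List.len_eq, PySem.Int.floordiv_eq_ediv_of_pos (by norm_num)]
  omega

-- elimination form of find? on a descending range(a, -1, -1)
lemma pvFindDescAux (k : Nat) (a : Int) (ha : a < (k : Int)) (p : Int → Bool) :
    ((PySem.List.pyRange a (-1) (-1)).find? p = none → ∀ j : Int, 0 ≤ j → j ≤ a → p j = false)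
  ∧ (∀ i : Int, (PySem.List.pyRange a (-1) (-1)).find? p = some i →
      0 ≤ i ∧ i ≤ a ∧ p i = true ∧ ∀ j : Int, i < j → j ≤ a → p j = false) := by
  induction k generalizing a with
  | zero =>
    rw [PySem.List.pyRange_neg_one_eq_nil (by omega)]
    exact ⟨fun _ j hj1 hj2 => absurd hj1 (by omega), fun i hi => by simp at hi⟩
  | succ k ih =>
    by_cases h0 : a < 0
    · rw [PySem.List.pyRange_neg_one_eq_nil (by omega)]
      exact ⟨fun _ j hj1 hj2 => absurd hj1 (by omega), fun i hi => by simp at hi⟩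
    · rw [PySem.List.pyRange_neg_one_cons (by omega), List.find?_cons]
      rcases ih (a - 1) (by omega) with ⟨ihn, ihs⟩
      cases hpa : p a with
      | true =>
        constructor
        · intro h; simp at h
        · intro i hi
          simp only [Option.some.injEq] at hi
          subst hi
          exact ⟨by omega, le_refl _, hpa, fun j hj1 hj2 => absurd hj1 (by omega)⟩
      | false =>
        constructor
        · intro h j hj1 hj2
          by_cases hja : j = a
          · subst hja; exact hpa
          · exact ihn h j hj1 (by omega)
        · intro i hi
          rcases ihs i hi with ⟨h1, h2, h3, h4⟩
          refine ⟨h1, by omega, h3, fun j hj1 hj2 => ?_⟩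
          by_cases hja : j = a
          · subst hja; exact hpa
          · exact h4 j hj1 (by omega)

-- elimination form of find? on an ascending range(a, b)
lemma pvFindAscAux (k : Nat) (a b : Int) (hk : b - a ≤ (k : Int)) (p : Int → Bool) :
    ((PySem.List.pyRange a b 1).find? p = none → ∀ x : Int, a ≤ x → x < b → p x = false)
  ∧ (∀ i : Int, (PySem.List.pyRange a b 1).find? p = some i →
      a ≤ i ∧ i < b ∧ p i = true ∧ ∀ x : Int, a ≤ x → x < i → p x = false) := by
  induction k generalizing a with
  | zero =>
    rw [PySem.List.pyRange_one_eq_nil (by omega)]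
    exact ⟨fun _ x h1 h2 => absurd h1 (by omega), fun i hi => by simp at hi⟩
  | succ k ih =>
    by_cases hab : b ≤ a
    · rw [PySem.List.pyRange_one_eq_nil hab]
      exact ⟨fun _ x h1 h2 => absurd h1 (by omega), fun i hi => by simp at hi⟩
    · rw [PySem.List.pyRange_one_cons (by omega), List.find?_cons]
      rcases ih (a + 1) (by omega) with ⟨ihn, ihs⟩
      cases hpa : p a with
      | true =>
        constructor
        · intro h; simp at h
        · intro i hi
          simp only [Option.some.injEq] at hi
          subst hi
          exact ⟨le_refl _, by omega, hpa, fun x h1 h2 => absurd h1 (by omega)⟩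
      | false =>
        constructor
        · intro h x h1 h2
          rcases eq_or_lt_of_le h1 with h3 | h3
          · subst h3; exact hpa
          · exact ihn h x (by omega) h2
        · intro i hi
          rcases ihs i hi with ⟨h1, h2, h3, h4⟩
          refine ⟨by omega, h2, h3, fun x hx1 hx2 => ?_⟩
          rcases eq_or_lt_of_le hx1 with h5 | h5
          · subst h5; exact hpa
          · exact h4 x (by omega) hx2

-- elimination form of findSome? on an ascending range(a, b)
lemma pvFindSomeAscAux {R : Type} (k : Nat) (a b : Int) (hk : b - a ≤ (k : Int)) (F : Int → Option R) :
    ((PySem.List.pyRange a b 1).findSome? F = none → ∀ x : Int, a ≤ x → x < b → F x = none)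
  ∧ (∀ r : R, (PySem.List.pyRange a b 1).findSome? F = some r →
      ∃ x : Int, a ≤ x ∧ x < b ∧ F x = some r ∧ ∀ y : Int, a ≤ y → y < x → F y = none) := by
  induction k generalizing a with
  | zero =>
    rw [PySem.List.pyRange_one_eq_nil (by omega)]
    exact ⟨fun _ x h1 h2 => absurd h1 (by omega), fun r hr => by simp at hr⟩
  | succ k ih =>
    by_cases hab : b ≤ a
    · rw [PySem.List.pyRange_one_eq_nil hab]
      exact ⟨fun _ x h1 h2 => absurd h1 (by omega), fun r hr => by simp at hr⟩
    · rw [PySem.List.pyRange_one_cons (by omega), List.findSome?_cons]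
      rcases ih (a + 1) (by omega) with ⟨ihn, ihs⟩
      cases hFa : F a with
      | some v =>
        constructor
        · intro h; simp at h
        · intro r hr
          simp only [Option.some.injEq] at hr
          subst hr
          exact ⟨a, le_refl _, by omega, hFa, fun y h1 h2 => absurd h1 (by omega)⟩
      | none =>
        constructor
        · intro h x h1 h2
          rcases eq_or_lt_of_le h1 with h3 | h3
          · subst h3; exact hFa
          · exact ihn h x (by omega) h2
        · intro r hr
          rcases ihs r hr with ⟨x, h1, h2, h3, h4⟩
          refine ⟨x, by omega, h2, h3, fun y hy1 hy2 => ?_⟩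
          rcases eq_or_lt_of_le hy1 with h5 | h5
          · subst h5; exact hFa
          · exact h4 y (by omega) hy2

lemma pvACheck_iff (seq : List Int) (mu lam : Int) :
    pvACheck seq mu lam = true ↔ pvPer seq lam mu := by
  unfold pvACheck pvPer
  rw [List.all_eq_true]
  constructor
  · intro h j hj1 hj2
    have h2 := h (j - mu) (by
      rw [PySem.List.mem_pyRange_one, PySem.List.len_eq]; omega)
    rw [show mu + (j - mu) = j by ring, show mu + lam + (j - mu) = j + lam by ring] at h2
    exact beq_iff_eq.mp h2
  · intro h i hi
    rw [PySem.List.mem_pyRange_one, PySem.List.len_eq] at hi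
    have h2 := h (mu + i) (by omega) (by omega)
    rw [show mu + i + lam = mu + lam + i by ring] at h2
    exact beq_iff_eq.mpr h2

lemma pvBScan_nonneg (seq : List Int) (lam : Int) : 0 ≤ pvBScan seq lam := by
  unfold pvBScan
  rcases hf : (PySem.List.pyRange (PySem.List.len seq - lam - 1) (-1) (-1)).find?
      (fun i => PySem.List.pyGetD seq i 0 != PySem.List.pyGetD seq (i + lam) 0) with _ | i
  · exact le_refl 0
  · show (0:Int) ≤ i + 1
    have := (pvFindDescAux ((seq.length : Int) - lam + 2).toNat (PySem.List.len seq - lam - 1)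
      (by rw [PySem.List.len_eq]; omega) _).2 i hf
    omega

lemma pvBScan_le_iff (seq : List Int) (lam mu : Int) (hmu : 0 ≤ mu) :
    pvBScan seq lam ≤ mu ↔ pvPer seq lam mu := by
  have hper : pvPer seq lam mu ↔ ∀ j : Int, mu ≤ j → j ≤ (seq.length : Int) - lam - 1 →
      (PySem.List.pyGetD seq j 0 != PySem.List.pyGetD seq (j + lam) 0) = false := by
    unfold pvPer
    constructor
    · intro h j h1 h2
      simp only [bne_eq_false_iff_eq]
      exact h j h1 (by omega)
    · intro h j h1 h2
      have := h j h1 (by omega)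
      simpa using this
  unfold pvBScan
  rcases hf : (PySem.List.pyRange (PySem.List.len seq - lam - 1) (-1) (-1)).find?
      (fun i => PySem.List.pyGetD seq i 0 != PySem.List.pyGetD seq (i + lam) 0) with _ | i
  · have hn := (pvFindDescAux ((seq.length : Int) - lam + 2).toNat (PySem.List.len seq - lam - 1)
      (by rw [PySem.List.len_eq]; omega) _).1 hf
    rw [PySem.List.len_eq] at hn
    show (0:Int) ≤ mu ↔ _
    constructor
    · intro _
      rw [hper]
      intro j h1 h2
      exact hn j (by omega) h2
    · intro _; exact hmu
  · have hs := (pvFindDescAux ((seq.length : Int) - lam + 2).toNat (PySem.List.len seq - lam - 1)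
      (by rw [PySem.List.len_eq]; omega) _).2 i hf
    rw [PySem.List.len_eq] at hs
    rcases hs with ⟨h1, h2, h3, h4⟩
    show i + 1 ≤ mu ↔ _
    constructor
    · intro hle
      rw [hper]
      intro j hj1 hj2
      exact h4 j (by omega) hj2
    · intro hp
      by_contra hlt
      rw [hper] at hp
      have := hp i (by omega) h2
      rw [this] at h3
      exact Bool.false_ne_true h3

lemma portA_shape (seq : List Int) : pvShape seq (naive_cycle_detector seq) := by
  have hhl := pvHalf_le seq
  unfold naive_cycle_detector
  set half : Int := PySem.Int.floordiv (PySem.List.len seq) 2 with hhalf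
  have hFnone : ∀ mu : Int,
      ((PySem.List.pyRange 1 (half - mu) 1).find? (fun lam => pvACheck seq mu lam)).map
        (fun lam => ((some mu, some lam) : Option Int × Option Int)) = none →
      ∀ lam : Int, 1 ≤ lam → mu + lam < half → ¬ pvPer seq lam mu := by
    intro mu hm lam h1 h2 hper
    rw [Option.map_eq_none_iff] at hm
    have hfalse := (pvFindAscAux (half - mu - 1).toNat 1 (half - mu)
      (by omega) _).1 hm lam h1 (by omega)
    have hc := (pvACheck_iff seq mu lam).mpr hper
    rw [hfalse] at hc
    exact Bool.false_ne_true hc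
  rcases hr : (PySem.List.pyRange 0 (PySem.List.len seq) 1).findSome?
      (fun mu =>
        ((PySem.List.pyRange 1 (half - mu) 1).find? (fun lam => pvACheck seq mu lam)).map
          (fun lam => ((some mu, some lam) : Option Int × Option Int))) with _ | r
  · rw [Option.getD_none]
    have hno := (pvFindSomeAscAux seq.length 0 (PySem.List.len seq)
      (by rw [PySem.List.len_eq]; omega) _).1 hr
    refine Or.inl ⟨rfl, fun lam mu hg => ?_⟩
    rcases hg with ⟨g1, g2, g3, g4⟩
    rw [← hhalf] at g3
    have hFmu := hno mu g2 (by rw [PySem.List.len_eq]; omega)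
    exact hFnone mu hFmu lam g1 g3 g4
  · rw [Option.getD_some]
    have hs := (pvFindSomeAscAux seq.length 0 (PySem.List.len seq)
      (by rw [PySem.List.len_eq]; omega) _).2 r hr
    rcases hs with ⟨mu, hmu0, hmun, hFmu, hbefore⟩
    rw [Option.map_eq_some_iff] at hFmu
    rcases hFmu with ⟨lam, hfind, hrr⟩
    have hl := (pvFindAscAux (half - mu - 1).toNat 1 (half - mu) (by omega) _).2 lam hfind
    rcases hl with ⟨hl1, hl2, hl3, hl4⟩
    refine Or.inr ⟨mu, lam, hrr.symm,
      ⟨hl1, hmu0, by rw [← hhalf]; omega, (pvACheck_iff seq mu lam).mp hl3⟩,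
      fun lam' mu' hg => ?_⟩
    rcases hg with ⟨g1, g2, g3, g4⟩
    rw [← hhalf] at g3
    rcases lt_trichotomy mu' mu with h | h | h
    · exact absurd g4 (hFnone mu' (hbefore mu' g2 h) lam' g1 g3)
    · subst h
      right
      refine ⟨rfl, ?_⟩
      by_contra hclt
      have hfalse := hl4 lam' g1 (by omega)
      have hc := (pvACheck_iff seq mu' lam').mpr g4
      rw [hfalse] at hc
      exact Bool.false_ne_true hc
    · exact Or.inl h

-- loop invariant of Source B's fold over lam = 1 … L-1
def pvBInv (seq : List Int) (half : Int) (s : Option Int × Option Int) (L : Int) : Prop :=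
  (s = (none, none) ∧ ∀ lam : Int, 1 ≤ lam → lam < L → ¬(pvBScan seq lam + lam < half))
  ∨ (∃ mu lam : Int, s = (some mu, some lam) ∧ 1 ≤ lam ∧ lam < L ∧ mu = pvBScan seq lam ∧
      pvBScan seq lam + lam < half ∧
      ∀ lam' : Int, 1 ≤ lam' → lam' < L → pvBScan seq lam' + lam' < half →
        mu ≤ pvBScan seq lam' ∧ (pvBScan seq lam' ≤ mu → lam ≤ lam'))

lemma pvBFoldInv (seq : List Int) (half : Int) (k : Nat) :
    pvBInv seq half ((PySem.List.pyRange 1 (1 + (k : Int)) 1).foldl (pvBStep seq half) (none, none))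
      (1 + (k : Int)) := by
  induction k with
  | zero =>
    rw [PySem.List.pyRange_one_eq_nil (by omega)]
    exact Or.inl ⟨rfl, fun lam h1 h2 => absurd h1 (by omega)⟩
  | succ k ih =>
    have hsplit : PySem.List.pyRange 1 (1 + ((k + 1 : Nat) : Int)) 1
        = PySem.List.pyRange 1 (1 + (k : Int)) 1 ++ [1 + (k : Int)] := by
      push_cast
      rw [show (1 : Int) + ((k : Int) + 1) = (1 + (k : Int)) + 1 by ring]
      exact PySem.List.pyRange_one_succ_right (by omega)
    rw [hsplit, List.foldl_append]
    set L : Int := 1 + (k : Int) with hL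
    set s : Option Int × Option Int :=
      (PySem.List.pyRange 1 L 1).foldl (pvBStep seq half) (none, none) with hs
    simp only [List.foldl_cons, List.foldl_nil]
    have hcast : 1 + ((k + 1 : Nat) : Int) = L + 1 := by push_cast; ring
    rw [hcast]
    rcases ih with ⟨hnone, hall⟩ | ⟨mu, lam, hsome, h1, h2, h3, h4, hmin⟩
    · rw [hnone]
      unfold pvBStep
      by_cases hf : pvBScan seq L + L < half
      · rw [if_pos ⟨hf, Or.inl rfl⟩]
        refine Or.inr ⟨pvBScan seq L, L, rfl, by omega, by omega, rfl, hf, ?_⟩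
        intro lam' hl1 hl2 hl3
        by_cases hlt : lam' < L
        · exact absurd hl3 (hall lam' hl1 hlt)
        · have : lam' = L := by omega
          subst this
          exact ⟨le_refl _, fun _ => le_refl _⟩
      · rw [if_neg (fun hc => hf hc.1)]
        refine Or.inl ⟨rfl, fun lam hl1 hl2 => ?_⟩
        by_cases hlt : lam < L
        · exact hall lam hl1 hlt
        · have : lam = L := by omega
          subst this; exact hf
    · rw [hsome]
      unfold pvBStep
      by_cases hf : pvBScan seq L + L < half ∧ pvBScan seq L < mu
      · rw [if_pos ⟨hf.1, Or.inr ⟨mu, rfl, hf.2⟩⟩]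
        refine Or.inr ⟨pvBScan seq L, L, rfl, by omega, by omega, rfl, hf.1, ?_⟩
        intro lam' hl1 hl2 hl3
        by_cases hlt : lam' < L
        · have := hmin lam' hl1 hlt hl3
          exact ⟨by omega, fun hle => absurd hle (by omega)⟩
        · have : lam' = L := by omega
          subst this
          exact ⟨le_refl _, fun _ => le_refl _⟩
      · rw [if_neg (fun hc => hf ⟨hc.1, by
          rcases hc.2 with h | ⟨bm, hbm, hlt⟩
          · exact absurd h (by simp)
          · simp only [Option.some.injEq] at hbm; omega⟩)]
        refine Or.inr ⟨mu, lam, rfl, h1, by omega, h3, h4, ?_⟩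
        intro lam' hl1 hl2 hl3
        by_cases hlt : lam' < L
        · exact hmin lam' hl1 hlt hl3
        · have : lam' = L := by omega
          subst this
          constructor
          · by_contra hc
            exact hf ⟨hl3, by omega⟩
          · intro _; omega

lemma portB_shape (seq : List Int) : pvShape seq (naive_cycle_detector_alt seq) := by
  have hhl := pvHalf_le seq
  show pvShape seq ((PySem.List.pyRange 1 (PySem.Int.floordiv (PySem.List.len seq) 2) 1).foldl
    (pvBStep seq (PySem.Int.floordiv (PySem.List.len seq) 2)) (none, none))
  set half : Int := PySem.Int.floordiv (PySem.List.len seq) 2 with hhalf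
  by_cases h1 : half ≤ 1
  · rw [PySem.List.pyRange_one_eq_nil h1]
    refine Or.inl ⟨rfl, fun lam mu hg => ?_⟩
    rcases hg with ⟨g1, g2, g3, _⟩
    rw [← hhalf] at g3
    omega
  · have hk : half = 1 + ((half - 1).toNat : Int) := by omega
    have hinv := pvBFoldInv seq half (half - 1).toNat
    rw [← hk] at hinv
    rcases hinv with ⟨hnone, hall⟩ | ⟨mu, lam, hsome, b1, b2, b3, b4, hmin⟩
    · rw [hnone]
      refine Or.inl ⟨rfl, fun lam mu hg => ?_⟩
      rcases hg with ⟨g1, g2, g3, g4⟩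
      rw [← hhalf] at g3
      have hsc : pvBScan seq lam ≤ mu := (pvBScan_le_iff seq lam mu g2).mpr g4
      exact hall lam g1 (by omega) (by omega)
    · rw [hsome]
      refine Or.inr ⟨mu, lam, rfl,
        ⟨b1, by rw [b3]; exact pvBScan_nonneg seq lam, by rw [← hhalf]; omega, ?_⟩,
        fun lam' mu' hg => ?_⟩
      · rw [b3]
        exact (pvBScan_le_iff seq lam _ (pvBScan_nonneg seq lam)).mp (le_of_eq rfl)
      · rcases hg with ⟨g1, g2, g3, g4⟩
        rw [← hhalf] at g3
        have hsc : pvBScan seq lam' ≤ mu' := (pvBScan_le_iff seq lam' mu' g2).mpr g4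
        have hm := hmin lam' g1 (by omega) (by omega)
        by_cases he : mu = mu'
        · exact Or.inr ⟨he, hm.2 (by omega)⟩
        · exact Or.inl (by omega)

-- ===== VERDICT (by name: the statement is the Claim_ definition above) =====
theorem naive_cycle_detector_spec : Claim_equal_naive_cycle_detector := by
  intro seq _
  unfold Spec_naive_cycle_detector
  rcases portA_shape seq with ⟨hA, hAno⟩ | ⟨muA, lamA, hA, hAg, hAmin⟩
  · rcases portB_shape seq with ⟨hB, hBno⟩ | ⟨muB, lamB, hB, hBg, _⟩
    · rw [hA, hB]
    · exact absurd hBg (hAno _ _)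
  · rcases portB_shape seq with ⟨hB, hBno⟩ | ⟨muB, lamB, hB, hBg, hBmin⟩
    · exact absurd hAg (hBno _ _)
    · have heq : muA = muB ∧ lamA = lamB := by
        rcases hAmin _ _ hBg with h1 | ⟨h1, h2⟩
        · rcases hBmin _ _ hAg with h3 | ⟨h3, h4⟩
          · exact ⟨by omega, by omega⟩
          · exact ⟨by omega, by omega⟩
        · rcases hBmin _ _ hAg with h3 | ⟨h3, h4⟩
          · exact ⟨by omega, by omega⟩
          · exact ⟨by omega, by omega⟩
      rw [hA, hB, heq.1, heq.2]
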